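-- pv_equiv track=rewrite | github.com/HelloSSIFI/HelloWorld | programmers/2022_코딩테스트_실전_대비_모의고사/s2_tlsqktem483.py | solution
-- ===== SOURCE A (Python) =====
-- def solution(want, number, discount):
--     answer = 0
--     for day in range(len(discount) - 10 + 1):
--         day_discount = discount[day:day+10]
--         flag = False
--         for i in range(len(want)):
--             if day_discount.count(want[i]) < number[i]:
--                 flag = True
--         if not flag:
--             answer += 1
--
--     return answer
-- ===== SOURCE B (Python) =====
-- def solution(want, number, discount):
--     n = len(discount)
--     if n < 10:
--         return 0
--
--     counts = {}
--     for item in discount[:10]: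
--         counts[item] = counts.get(item, 0) + 1
--
--     def ok():
--         return all(counts.get(want[i], 0) >= number[i] for i in range(len(want)))
--
--     answer = 1 if ok() else 0
--     for day in range(1, n - 9):
--         enter = discount[day + 9]
--         counts[enter] = counts.get(enter, 0) + 1
--         leave = discount[day - 1]
--         c = counts[leave] - 1
--         if c == 0:
--             del counts[leave]
--         else:
--             counts[leave] = c
--         if ok():
--             answer += 1
--     return answer
-- ===== Notes on version B (the rewrite author's own statement) =====
-- stated objective: faster
-- what changed: B maintains one sliding dict counter of the current 10-item window (add the entering item, decrement/remove the leaving one) instead of re-slicing the list and re-counting each wanted item with .count for every window.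
import Mathlib
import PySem

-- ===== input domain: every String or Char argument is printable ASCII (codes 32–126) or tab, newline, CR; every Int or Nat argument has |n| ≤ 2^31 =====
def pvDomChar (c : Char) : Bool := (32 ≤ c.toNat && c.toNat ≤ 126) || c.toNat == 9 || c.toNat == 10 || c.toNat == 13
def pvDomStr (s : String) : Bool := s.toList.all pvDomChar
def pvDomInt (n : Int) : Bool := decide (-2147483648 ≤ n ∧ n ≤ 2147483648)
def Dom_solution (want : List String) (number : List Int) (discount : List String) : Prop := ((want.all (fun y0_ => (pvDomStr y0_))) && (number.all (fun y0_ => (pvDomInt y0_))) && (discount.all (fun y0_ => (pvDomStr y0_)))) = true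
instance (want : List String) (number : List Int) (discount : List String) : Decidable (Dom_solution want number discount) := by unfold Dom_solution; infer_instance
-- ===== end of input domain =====

-- B replaces A's per-window slice-and-count rescans by one sliding multiset counter updated incrementally across the days.
-- (Out-of-range pyGetD defaults below are never hit on inputs satisfying Pre_solution.)

-- ===== PORT A =====
def solution (want : List String) (number : List Int) (discount : List String) : Int :=
  (PySem.List.pyRange 0 ((discount.length : Int) - 10 + 1) 1).foldl (fun answer day =>
    let day_discount := PySem.List.slice discount (some day) (some (day + 10))
    let flag := (PySem.List.pyRange 0 (want.length : Int) 1).foldl (fun flag i =>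
      if ((PySem.List.count day_discount (PySem.List.pyGetD want i "") : Int) <
            PySem.List.pyGetD number i 0) then true else flag) false
    if flag then answer else answer + 1) 0

-- ===== PORT B =====
-- 'all(counts.get(want[i], 0) >= number[i] for i in range(len(want)))'
def altOk (want : List String) (number : List Int) (counts : PySem.Dict String Int) : Bool :=
  (PySem.List.pyRange 0 (want.length : Int) 1).all (fun i =>
    decide (PySem.List.pyGetD number i 0 ≤ counts.getD (PySem.List.pyGetD want i "") 0))

def solution_alt (want : List String) (number : List Int) (discount : List String) : Int :=
  if discount.length < 10 then 0
  else
    let counts0 := (PySem.List.slice discount none (some (10 : Int))).foldl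
        (fun d item => d.insert item (d.getD item 0 + 1)) PySem.Dict.empty
    let answer0 : Int := if altOk want number counts0 then 1 else 0
    -- Python's 'counts[leave]' is ported as getD _ 0: 'leave' is always a key of the window counter.
    ((PySem.List.pyRange 1 ((discount.length : Int) - 9) 1).foldl
      (fun st day =>
        let enter := PySem.List.pyGetD discount (day + 9) ""
        let c1 := st.1.insert enter (st.1.getD enter 0 + 1)
        let leave := PySem.List.pyGetD discount (day - 1) ""
        let c := c1.getD leave 0 - 1
        let c2 := if c = 0 then c1.erase leave else c1.insert leave c
        (c2, if altOk want number c2 then st.2 + 1 else st.2))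
      (counts0, answer0)).2

-- ===== PRECONDITION & SPEC =====
-- Pre_ excludes exactly the inputs where Python A raises IndexError: a window exists
-- (len(discount) ≥ 10) while want is longer than number, so number[i] is read out of range.
def Pre_solution (want : List String) (number : List Int) (discount : List String) : Prop :=
  discount.length < 10 ∨ want.length ≤ number.length
instance (want : List String) (number : List Int) (discount : List String) : Decidable (Pre_solution want number discount) := by unfold Pre_solution; infer_instance

def pvWitness_solution : List String × List Int × List String :=
  (["a"], [1], ["a", "a", "a", "b", "a", "a", "a", "a", "a", "a", "b"])

def Spec_solution (want : List String) (number : List Int) (discount : List String) (out : Int) : Prop := out = solution_alt want number discount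
instance (want : List String) (number : List Int) (discount : List String) (out : Int) : Decidable (Spec_solution want number discount out) := by unfold Spec_solution; infer_instance

-- ===== CLAIM (what is proved, stated in full; the proofs are below) =====
def Claim_equal_solution : Prop := ∀ (want : List String) (number : List Int) (discount : List String), Dom_solution want number discount → Pre_solution want number discount → Spec_solution want number discount (solution want number discount)

-- ===== LEMMAS AND PROOFS =====

-- the common characterisation: the size-10 window starting at 'day' meets every requirement
def goodDay (want : List String) (number : List Int) (discount : List String) (day : Int) : Bool :=
  (PySem.List.pyRange 0 (want.length : Int) 1).all (fun i =>
    decide (PySem.List.pyGetD number i 0 ≤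
      (((discount.drop day.toNat).take 10).count (PySem.List.pyGetD want i "") : Int)))

theorem foldl_flag_eq_any (l : List Int) (c : Int → Prop) [DecidablePred c] (b : Bool) :
    l.foldl (fun flag i => if c i then true else flag) b = (b || l.any (fun i => decide (c i))) := by
  have h : (fun (flag : Bool) i => if c i then true else flag)
      = (fun flag i => if decide (c i) then true else flag) := by
    funext flag i; by_cases h : c i <;> simp [h]
  rw [h, PySem.List.foldl_if_true_eq]

theorem ite_flip (b : Bool) (x : Int) : (if b then x else x + 1) = (if !b then x + 1 else x) := by
  cases b <;> simp

theorem A_char (want : List String) (number : List Int) (discount : List String) :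
    solution want number discount =
      (((PySem.List.pyRange 0 ((discount.length : Int) - 9) 1).countP
          (goodDay want number discount) : Nat) : Int) := by
  unfold solution
  simp only [foldl_flag_eq_any, Bool.false_or, ite_flip, PySem.List.foldl_if_add_one, zero_add]
  have h109 : (discount.length : Int) - 10 + 1 = (discount.length : Int) - 9 := by omega
  rw [h109]
  congr 1
  apply List.countP_congr
  intro day hday
  have hd0 : 0 ≤ day := (PySem.List.mem_pyRange_one.mp hday).1
  unfold goodDay
  rw [PySem.List.slice_toNat discount hd0 (by omega : (0 : Int) ≤ day + 10)]
  have h10 : (day + 10).toNat - day.toNat = 10 := by omega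
  rw [h10]
  simp [List.not_any_eq_all_not, not_lt, PySem.List.count_eq]

-- getD after erase (the PySem book has no erase lemmas)
theorem find?_filter_ne (t : List (String × Int)) (k k' : String) (h : k' ≠ k) :
    List.find? (fun p => p.1 == k') (t.filter (fun p => !(p.1 == k))) =
      List.find? (fun p => p.1 == k') t := by
  induction t with
  | nil => rfl
  | cons p t ih =>
    rw [List.filter_cons]
    by_cases h1 : p.1 = k
    · have hkk : (k == k') = false := by simp; exact fun hh => h hh.symm
      simp [h1, hkk, ih]
    · have hne : (!(p.1 == k)) = true := by simp [h1]
      rw [hne, if_pos rfl]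
      rw [List.find?_cons, List.find?_cons]
      cases hpk : (p.1 == k') <;> simp [ih]

theorem getD_erase (d : PySem.Dict String Int) (k k' : String) (d0 : Int) :
    (d.erase k).getD k' d0 = if k' = k then d0 else d.getD k' d0 := by
  obtain ⟨items⟩ := d
  simp only [PySem.Dict.erase, PySem.Dict.getD, PySem.Dict.get?]
  by_cases h : k' = k
  · subst h
    have hfind : List.find? (fun p => p.1 == k') (items.filter (fun p => !(p.1 == k'))) = none := by
      apply List.find?_eq_none.mpr
      intro x hx
      simp only [List.mem_filter] at hx
      simpa using hx.2
    simp [hfind]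
  · rw [find?_filter_ne items k k' h, if_neg h]

theorem altOk_eq_goodDay (want : List String) (number : List Int) (discount : List String)
    (day : Int) (c : PySem.Dict String Int)
    (hc : ∀ s, c.getD s 0 = (((discount.drop day.toNat).take 10).count s : Int)) :
    altOk want number c = goodDay want number discount day := by
  simp only [altOk, goodDay, hc]

theorem window_shift (discount : List String) (d : Int) (hd : 1 ≤ d)
    (hdn : d + 10 ≤ (discount.length : Int)) (s : String) :
    (((discount.drop d.toNat).take 10).count s : Int) =
      (((discount.drop (d - 1).toNat).take 10).count s : Int)
        - (if s = PySem.List.pyGetD discount (d - 1) "" then 1 else 0)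
        + (if s = PySem.List.pyGetD discount (d + 9) "" then 1 else 0) := by
  obtain ⟨D, hD⟩ : ∃ D : Nat, d - 1 = (D : Int) := ⟨(d - 1).toNat, by omega⟩
  have hdt : d.toNat = D + 1 := by omega
  have hlt1 : D < discount.length := by omega
  have hlt2 : D + 10 < discount.length := by omega
  have hlt3 : D + 1 + 9 < discount.length := by omega
  have hleave : PySem.List.pyGetD discount (d - 1) "" = discount[D]'hlt1 := by
    rw [hD, PySem.List.pyGetD_natCast, List.getD_eq_getElem?_getD,
      List.getElem?_eq_getElem hlt1]
    rfl
  have henter : PySem.List.pyGetD discount (d + 9) "" = discount[D + 10]'hlt2 := by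
    have h9 : d + 9 = ((D + 10 : Nat) : Int) := by omega
    rw [h9, PySem.List.pyGetD_natCast, List.getD_eq_getElem?_getD,
      List.getElem?_eq_getElem hlt2]
    rfl
  have hold : (discount.drop D).take 10 = discount[D]'hlt1 :: (discount.drop (D + 1)).take 9 := by
    rw [List.drop_eq_getElem_cons hlt1]
    rfl
  have hnew : (discount.drop (D + 1)).take 10
      = (discount.drop (D + 1)).take 9 ++ [discount[D + 10]'hlt2] := by
    rw [List.take_add_one]
    congr 1
    rw [List.getElem?_drop, List.getElem?_eq_getElem hlt3]
    simp [show D + 1 + 9 = D + 10 from by omega]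
  have hD1 : (d - 1).toNat = D := by omega
  rw [hdt, hD1, hold, hnew, hleave, henter]
  clear hleave henter hold hnew hD hdt hD1
  rw [List.count_append, List.count_singleton, List.count_cons]
  by_cases h1 : discount[D]'hlt1 = s
  · subst h1
    by_cases h2 : discount[D + 10]'hlt2 = discount[D]'hlt1
    · simp [h2]
    · have h2' : ¬ discount[D]'hlt1 = discount[D + 10]'hlt2 := fun hh => h2 hh.symm
      simp [h2, h2']
  · by_cases h2 : discount[D + 10]'hlt2 = s
    · subst h2
      have h1' : ¬ discount[D + 10]'hlt2 = discount[D]'hlt1 := fun hh => h1 hh.symm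
      simp [h1, h1']
    · have h1' : ¬ s = discount[D]'hlt1 := fun hh => h1 hh.symm
      have h2' : ¬ s = discount[D + 10]'hlt2 := fun hh => h2 hh.symm
      simp [h1, h1', h2, h2']

theorem step_counts (discount : List String) (d : Int) (hd : 1 ≤ d)
    (hdn : d + 10 ≤ (discount.length : Int)) (c : PySem.Dict String Int)
    (hc : ∀ s, c.getD s 0 = (((discount.drop (d - 1).toNat).take 10).count s : Int)) (s : String) :
    (let enter := PySem.List.pyGetD discount (d + 9) ""
     let c1 := c.insert enter (c.getD enter 0 + 1)
     let leave := PySem.List.pyGetD discount (d - 1) ""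
     let cc := c1.getD leave 0 - 1
     let c2 := if cc = 0 then c1.erase leave else c1.insert leave cc
     c2.getD s 0) = (((discount.drop d.toNat).take 10).count s : Int) := by
  rw [window_shift discount d hd hdn s]
  dsimp only
  split_ifs with hcc <;>
    simp only [getD_erase, PySem.Dict.getD_insert, hc] at hcc ⊢ <;>
    split_ifs <;> simp_all

theorem B_loop (want : List String) (number : List Int) (discount : List String) :
    ∀ (m : Nat) (d : Int) (c : PySem.Dict String Int) (a : Int), 1 ≤ d →
      d + m = (discount.length : Int) - 9 →
      (∀ s, c.getD s 0 = (((discount.drop (d - 1).toNat).take 10).count s : Int)) →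
      ((PySem.List.pyRange d (d + m) 1).foldl
        (fun st day =>
          let enter := PySem.List.pyGetD discount (day + 9) ""
          let c1 := st.1.insert enter (st.1.getD enter 0 + 1)
          let leave := PySem.List.pyGetD discount (day - 1) ""
          let cv := c1.getD leave 0 - 1
          let c2 := if cv = 0 then c1.erase leave else c1.insert leave cv
          (c2, if altOk want number c2 then st.2 + 1 else st.2))
        (c, a)).2 =
      a + (((PySem.List.pyRange d (d + m) 1).countP (goodDay want number discount) : Nat) : Int) := by
  intro m
  induction m with
  | zero =>
    intro d c a hd hdm hc
    rw [show d + ((0 : Nat) : Int) = d from by omega, PySem.List.pyRange_one_eq_nil le_rfl]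
    simp
  | succ m ih =>
    intro d c a hd hdm hc
    have hdn : d + 10 ≤ (discount.length : Int) := by push_cast at hdm ⊢; omega
    rw [PySem.List.pyRange_one_cons (by push_cast; omega)]
    rw [List.foldl_cons, List.countP_cons]
    have hc2 := step_counts discount d hd hdn c hc
    dsimp only at hc2 ⊢
    have hshift : d + ((m + 1 : Nat) : Int) = (d + 1) + (m : Int) := by push_cast; omega
    rw [hshift]
    rw [ih (d + 1) _ _ (by omega) (by push_cast at hdm ⊢; omega)
      (fun s => by rw [show d + 1 - 1 = d from by omega]; exact hc2 s)]
    rw [altOk_eq_goodDay want number discount d _ hc2]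
    cases hgd : goodDay want number discount d <;> simp <;> push_cast <;> ring

-- ===== VERDICT (by name: the statement is the Claim_ definition above) =====
theorem solution_spec : Claim_equal_solution := by
  intro want number discount hdom hpre
  unfold Spec_solution
  rw [A_char]
  unfold solution_alt
  by_cases hlen : discount.length < 10
  · rw [if_pos hlen, PySem.List.pyRange_one_eq_nil (by omega : (discount.length : Int) - 9 ≤ 0)]
    simp
  · rw [if_neg hlen]
    dsimp only
    set C0 : PySem.Dict String Int := (PySem.List.slice discount none (some (10 : Int))).foldl
      (fun d item => d.insert item (d.getD item 0 + 1)) PySem.Dict.empty with hC0def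
    set A0 : Int := if altOk want number C0 then 1 else 0 with hA0def
    have hc0 : ∀ s, C0.getD s 0 = (((discount.drop ((1 : Int) - 1).toNat).take 10).count s : Int) := by
      intro s
      rw [hC0def, PySem.List.slice_to discount (by omega : (0 : Int) ≤ (10 : Int)),
        PySem.Dict.foldl_insert_getD_add_one_eq_counter, PySem.Dict.getD_counter]
      simp
    have hm : (1 : Int) + ((discount.length - 10 : Nat) : Int) = (discount.length : Int) - 9 := by
      omega
    have hB := B_loop want number discount (discount.length - 10) 1 C0 A0 le_rfl hm hc0
    rw [hm] at hB
    rw [hB]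
    rw [PySem.List.pyRange_one_cons (by omega : (0 : Int) < (discount.length : Int) - 9),
      List.countP_cons, show (0 : Int) + 1 = 1 from by omega]
    rw [hA0def, altOk_eq_goodDay want number discount 0 C0
      (by intro s; have := hc0 s; simpa using this)]
    cases hgd : goodDay want number discount 0 <;> simp <;> push_cast <;> ring
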